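-- pv_equiv track=rewrite | github.com/Edu92337/CodeForces | 144A.py | swipe
-- ===== SOURCE A (Python) =====
-- def swipe(n,sequencia):
--     n = int(n)
--     sequencia = [int(i) for i in sequencia]
--     menor = min(sequencia)
--     maior = max(sequencia)
--     min_posições = [i for i,k in enumerate(sequencia) if k == menor]
--     max_posições = [i for i,k in enumerate(sequencia) if k == maior]
--     t = min(max_posições) + abs(max(min_posições) - len(sequencia) +1)
--     if min(max_posições) > max(min_posições):
--         t -=1
--     return t
-- ===== SOURCE B (Python) =====
-- def swipe(n, sequencia):
--     n = int(n)
--     fila = [int(i) for i in sequencia]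
--     menor = min(fila)
--     maior = max(fila)
--     t = 0
--     # simulate: bubble the first tallest soldier to the front, one swap at a time
--     i = fila.index(maior)
--     while i > 0:
--         fila[i - 1], fila[i] = fila[i], fila[i - 1]
--         i -= 1
--         t += 1
--     # then bubble the last shortest soldier (in the updated line) to the back
--     j = len(fila) - 1 - fila[::-1].index(menor)
--     while j < len(fila) - 1:
--         fila[j], fila[j + 1] = fila[j + 1], fila[j]
--         j += 1
--         t += 1
--     return t
-- ===== Notes on version B (the rewrite author's own statement) =====
-- stated objective: alternative
-- what changed: Replaces A's index arithmetic (two materialised position lists, four min/max reductions, abs and an off-by-one correction) by a direct simulation: B actually bubbles the first tallest soldier to the front and then the last shortest soldier to the back with adjacent swaps on a copy of the line, counting the swaps; the correction term arises naturally because the first move shifts the shortest soldier.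
import Mathlib
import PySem

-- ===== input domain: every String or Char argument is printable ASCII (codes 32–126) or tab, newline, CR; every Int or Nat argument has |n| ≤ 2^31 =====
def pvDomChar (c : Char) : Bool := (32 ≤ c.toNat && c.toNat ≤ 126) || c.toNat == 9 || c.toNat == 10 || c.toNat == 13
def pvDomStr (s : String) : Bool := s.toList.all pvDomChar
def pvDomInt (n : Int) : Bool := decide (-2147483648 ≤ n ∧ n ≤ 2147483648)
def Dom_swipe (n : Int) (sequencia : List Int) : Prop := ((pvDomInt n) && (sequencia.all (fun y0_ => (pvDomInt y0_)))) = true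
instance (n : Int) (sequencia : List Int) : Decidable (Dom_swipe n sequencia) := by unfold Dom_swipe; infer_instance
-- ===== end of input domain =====

-- B replaces A's index-arithmetic formula by a swap-by-swap simulation of the two moves,
-- counting the adjacent swaps it performs (an alternative of the same cost, not faster).

-- ===== PORT A =====
-- literal transliteration of A: min/max of the list, two position lists built by filtering
-- enumerate, then A's formula with abs and the conditional correction.
def swipe (n : Int) (sequencia : List Int) : Int :=
  let menor := (PySem.List.min? sequencia (fun x => x)).getD 0
  let maior := (PySem.List.max? sequencia (fun x => x)).getD 0
  let min_pos := ((PySem.List.enumerate sequencia).filter (fun p => p.2 == menor)).map Prod.fst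
  let max_pos := ((PySem.List.enumerate sequencia).filter (fun p => p.2 == maior)).map Prod.fst
  let t := (PySem.List.min? max_pos (fun x => x)).getD 0 +
           |(PySem.List.max? min_pos (fun x => x)).getD 0 - (sequencia.length : Int) + 1|
  if (PySem.List.min? max_pos (fun x => x)).getD 0 >
     (PySem.List.max? min_pos (fun x => x)).getD 0 then t - 1 else t

-- ===== PORT B =====
-- B's first while loop: while i > 0, swap fila[i-1] and fila[i], counting; returns the
-- final list and counter.  (fila[a], fila[b] = fila[b], fila[a] is two List.set with the
-- old values, exact for in-range indices, which the loop maintains.)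
def pvLoop1 : List Int → Nat → Int → List Int × Int
  | fila, 0, t => (fila, t)
  | fila, i + 1, t =>
    pvLoop1 ((fila.set i (fila.getD (i + 1) 0)).set (i + 1) (fila.getD i 0)) i (t + 1)

-- B's second while loop: while j < len(fila) - 1, swap fila[j] and fila[j+1], counting.
def pvLoop2 (fila : List Int) (j : Nat) (t : Int) : List Int × Int :=
  if h : j + 1 < fila.length then
    pvLoop2 ((fila.set j (fila.getD (j + 1) 0)).set (j + 1) (fila.getD j 0)) (j + 1) (t + 1)
  else (fila, t)
termination_by fila.length - j
decreasing_by simp only [List.length_set]; omega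

-- literal transliteration of B: find the first tallest, bubble him to the front swap by
-- swap, find the last shortest in the updated line via the reversed copy, bubble him to
-- the back, return the swap count.  (.getD 0 on index?: the value searched is in the list.)
def swipe_alt (n : Int) (sequencia : List Int) : Int :=
  let fila := sequencia
  let menor := (PySem.List.min? fila (fun x => x)).getD 0
  let maior := (PySem.List.max? fila (fun x => x)).getD 0
  let i := (PySem.List.index? fila maior).getD 0
  let p := pvLoop1 fila i 0
  let rev := (PySem.List.slice? p.1 none none (-1)).getD []
  let j := p.1.length - 1 - (PySem.List.index? rev menor).getD 0
  (pvLoop2 p.1 j p.2).2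

-- ===== PRECONDITION & SPEC =====
-- Pre_ excludes only the empty list, on which Python's min() raises ValueError (in A and in B alike).
def Pre_swipe (n : Int) (sequencia : List Int) : Prop := sequencia ≠ []
instance (n : Int) (sequencia : List Int) : Decidable (Pre_swipe n sequencia) := by
  unfold Pre_swipe; infer_instance
def pvWitness_swipe : Int × List Int := (3, [1, 2, 3])
def Spec_swipe (n : Int) (sequencia : List Int) (out : Int) : Prop := out = swipe_alt n sequencia
instance (n : Int) (sequencia : List Int) (out : Int) : Decidable (Spec_swipe n sequencia out) := by unfold Spec_swipe; infer_instance

-- ===== CLAIM (what is proved, stated in full; the proofs are below) =====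
def Claim_equal_swipe : Prop := ∀ (n : Int) (sequencia : List Int), Dom_swipe n sequencia → Pre_swipe n sequencia → Spec_swipe n sequencia (swipe n sequencia)

-- ===== LEMMAS AND PROOFS =====

-- ---- positions of value v in xs, indices starting at s (what A's comprehensions compute)
def pvPos (v : Int) : List Int → Int → List Int
  | [], _ => []
  | x :: xs, s => (if x == v then [s] else []) ++ pvPos v xs (s + 1)

theorem pvPos_eq (v : Int) (xs : List Int) (s : Int) :
    ((PySem.List.enumerate xs s).filter (fun p => p.2 == v)).map Prod.fst = pvPos v xs s := by
  induction xs generalizing s with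
  | nil => simp [pvPos, PySem.List.enumerate_nil]
  | cons x xs ih =>
    simp only [PySem.List.enumerate_cons, List.filter_cons, pvPos]
    by_cases h : x == v <;> simp [h, ih]

theorem pvPos_ge (v : Int) (xs : List Int) (s : Int) :
    ∀ p ∈ pvPos v xs s, s ≤ p := by
  induction xs generalizing s with
  | nil => simp [pvPos]
  | cons x xs ih =>
    intro p hp
    simp only [pvPos, List.mem_append] at hp
    rcases hp with hp | hp
    · split at hp <;> simp_all
    · have := ih (s + 1) p hp; omega

theorem pvPos_pairwise (v : Int) (xs : List Int) (s : Int) :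
    (pvPos v xs s).Pairwise (· < ·) := by
  induction xs generalizing s with
  | nil => simp [pvPos]
  | cons x xs ih =>
    simp only [pvPos]
    refine List.pairwise_append.2 ⟨?_, ih (s + 1), ?_⟩
    · split <;> simp
    · intro a ha b hb
      have hb' := pvPos_ge v xs (s + 1) b hb
      split at ha <;> simp_all

theorem pvPos_append (v : Int) (a b : List Int) (s : Int) :
    pvPos v (a ++ b) s = pvPos v a s ++ pvPos v b (s + a.length) := by
  induction a generalizing s with
  | nil => simp [pvPos]
  | cons x a ih =>
    simp only [List.cons_append, pvPos, ih, List.length_cons, List.append_assoc]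
    congr 2
    push_cast
    ring_nf

theorem pvPos_nil_of_not_mem (v : Int) (a : List Int) (s : Int) (h : v ∉ a) :
    pvPos v a s = [] := by
  induction a generalizing s with
  | nil => rfl
  | cons x a ih =>
    simp only [List.mem_cons, not_or] at h
    simp only [pvPos, beq_iff_eq]
    rw [if_neg (by exact fun hx => h.1 (hx ▸ rfl)), ih (s + 1) h.2]
    rfl

-- foldl min stays at a lower bound
theorem pv_foldl_min_const (t : List Int) (a : Int) (h : ∀ y ∈ t, a ≤ y) :
    t.foldl min a = a := by
  induction t generalizing a with
  | nil => rfl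
  | cons y t ih =>
    simp only [List.foldl_cons]
    rw [min_eq_left (h y (by simp))]
    exact ih a (fun z hz => h z (by simp [hz]))

-- foldl max over a sorted tail walks to the last element
theorem pv_foldl_max_sorted (t : List Int) (a : Int) (h : ∀ y ∈ t, a ≤ y)
    (hs : t.Pairwise (· ≤ ·)) : t.foldl max a = t.getLastD a := by
  induction t generalizing a with
  | nil => rfl
  | cons y t ih =>
    simp only [List.foldl_cons, List.getLastD_cons]
    rw [max_eq_right (h y (by simp))]
    exact ih y (fun z hz => (List.pairwise_cons.1 hs).1 z hz) (List.pairwise_cons.1 hs).2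

-- min of a position list is its head, max its last element
theorem min?_pvPos (v : Int) (xs : List Int) (s : Int) (h : pvPos v xs s ≠ []) :
    (PySem.List.min? (pvPos v xs s) (fun x => x)).getD 0 = (pvPos v xs s).headD 0 := by
  rcases hl : pvPos v xs s with _ | ⟨p, t⟩
  · exact absurd hl h
  · have hall : ∀ y ∈ t, p ≤ y := by
      intro y hy
      have := (List.pairwise_cons.1 (hl ▸ pvPos_pairwise v xs s)).1 y hy
      omega
    rw [PySem.List.min?_id_cons, pv_foldl_min_const t p hall]
    rfl

theorem max?_pvPos (v : Int) (xs : List Int) (s : Int) (h : pvPos v xs s ≠ []) :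
    (PySem.List.max? (pvPos v xs s) (fun x => x)).getD 0 = (pvPos v xs s).getLastD 0 := by
  rcases hl : pvPos v xs s with _ | ⟨p, t⟩
  · exact absurd hl h
  · have hpw := hl ▸ pvPos_pairwise v xs s
    have hall : ∀ y ∈ t, p ≤ y := by
      intro y hy
      have := (List.pairwise_cons.1 hpw).1 y hy
      omega
    rw [PySem.List.max?_id_cons,
        pv_foldl_max_sorted t p hall ((List.pairwise_cons.1 hpw).2.imp (fun h => le_of_lt h))]
    simp [List.getLast?_cons, List.getLastD_eq_getLast?]

-- ---- first/last occurrence decompositions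
def pvFirstAt (v : Int) (xs : List Int) (k : Nat) : Prop :=
  ∃ pre suf, xs = pre ++ v :: suf ∧ pre.length = k ∧ v ∉ pre

def pvLastAt (v : Int) (xs : List Int) (k : Nat) : Prop :=
  ∃ pre suf, xs = pre ++ v :: suf ∧ pre.length = k ∧ v ∉ suf

theorem pv_index?_of_firstAt (v : Int) (xs : List Int) (k : Nat) (h : pvFirstAt v xs k) :
    PySem.List.index? xs v = some k := by
  obtain ⟨pre, suf, rfl, rfl, hnm⟩ := h
  induction pre with
  | nil => simpa using PySem.List.index?_cons_self v suf
  | cons x pre ih =>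
    have hx : x ≠ v := fun hh => hnm (by simp [hh])
    rw [List.cons_append, PySem.List.index?_cons_of_ne _ hx,
        ih (fun hm => hnm (List.mem_cons_of_mem _ hm))]
    rfl

theorem pv_firstAt_unique (v : Int) (xs : List Int) (k k' : Nat)
    (h : pvFirstAt v xs k) (h' : pvFirstAt v xs k') : k = k' := by
  have := pv_index?_of_firstAt v xs k h
  have := pv_index?_of_firstAt v xs k' h'
  simp_all

theorem pv_lastAt_reverse (v : Int) (xs : List Int) (k : Nat) (h : pvLastAt v xs k) :
    pvFirstAt v xs.reverse (xs.length - 1 - k) ∧ k < xs.length := by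
  obtain ⟨pre, suf, rfl, rfl, hnm⟩ := h
  constructor
  · refine ⟨suf.reverse, pre.reverse, by simp, ?_, by simpa using hnm⟩
    simp only [List.length_reverse, List.length_append, List.length_cons]
    omega
  · simp only [List.length_append, List.length_cons]; omega

theorem pv_lastAt_unique (v : Int) (xs : List Int) (k k' : Nat)
    (h : pvLastAt v xs k) (h' : pvLastAt v xs k') : k = k' := by
  obtain ⟨h1, h2⟩ := pv_lastAt_reverse v xs k h
  obtain ⟨h1', h2'⟩ := pv_lastAt_reverse v xs k' h'
  have := pv_firstAt_unique v xs.reverse _ _ h1 h1'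
  omega

theorem pv_exists_lastAt (v : Int) (xs : List Int) (h : v ∈ xs) :
    ∃ k, pvLastAt v xs k := by
  induction xs with
  | nil => simp at h
  | cons x xs ih =>
    by_cases hv : v ∈ xs
    · obtain ⟨k, pre, suf, heq, hlen, hnm⟩ := ih hv
      exact ⟨k + 1, x :: pre, suf, by simp [heq], by simp [hlen], hnm⟩
    · rcases List.mem_cons.1 h with rfl | hv'
      · exact ⟨0, [], xs, rfl, rfl, hv⟩
      · exact absurd hv' hv

-- headD / getLastD of pvPos from a decomposition
theorem pv_headD_pvPos (v : Int) (pre suf : List Int) (h : v ∉ pre) :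
    (pvPos v (pre ++ v :: suf) 0).headD 0 = (pre.length : Int) := by
  rw [pvPos_append, pvPos_nil_of_not_mem v pre 0 h]
  simp [pvPos]

theorem pv_getLastD_pvPos (v : Int) (pre suf : List Int) (h : v ∉ suf) :
    (pvPos v (pre ++ v :: suf) 0).getLastD 0 = (pre.length : Int) := by
  rw [pvPos_append]
  simp only [pvPos, beq_self_eq_true, if_true, List.singleton_append]
  rw [pvPos_nil_of_not_mem v suf _ h]
  simp

theorem pv_pvPos_ne_nil_of_decomp (v : Int) (pre suf : List Int) :
    pvPos v (pre ++ v :: suf) 0 ≠ [] := by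
  rw [pvPos_append]
  simp [pvPos]

-- ---- B's loops
-- getting and erasing at the junction of a decomposition
theorem pv_getD_mid (pre suf : List Int) (x d : Int) :
    (pre ++ x :: suf).getD pre.length d = x := by
  induction pre with
  | nil => rfl
  | cons y pre ih => simpa using ih

theorem pv_eraseIdx_mid (pre suf : List Int) (x : Int) :
    (pre ++ x :: suf).eraseIdx pre.length = pre ++ suf := by
  induction pre with
  | nil => rfl
  | cons y pre ih => simp [List.eraseIdx_cons_succ, ih]

-- loop 1 moves the element at index k to the front and adds k to the counter
theorem pvLoop1_correct (k : Nat) (xs : List Int) (t : Int) (hk : k < xs.length) :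
    pvLoop1 xs k t = (xs.getD k 0 :: xs.eraseIdx k, t + k) := by
  induction k generalizing xs t with
  | zero =>
    rcases xs with _ | ⟨x, xs⟩
    · simp at hk
    · simp [pvLoop1]
  | succ k ih =>
    have hlen : ((xs.set k (xs.getD (k + 1) 0)).set (k + 1) (xs.getD k 0)).length = xs.length := by
      simp
    rw [pvLoop1, ih _ _ (by omega)]
    set xs' := (xs.set k (xs.getD (k + 1) 0)).set (k + 1) (xs.getD k 0) with hxs'
    have hget : xs'.getD k 0 = xs.getD (k + 1) 0 := by
      simp only [hxs', List.getD, List.getElem?_set]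
      split_ifs with h1 h2 <;> simp_all <;> omega
    have herase : xs'.eraseIdx k = xs.eraseIdx (k + 1) := by
      apply List.ext_getElem?
      intro i
      rw [List.getElem?_eraseIdx, List.getElem?_eraseIdx]
      rcases lt_trichotomy i k with h | rfl | h
      · rw [if_pos h, if_pos (by omega)]
        simp only [hxs', List.getElem?_set]
        rw [if_neg (by omega), if_neg (by omega)]
      · rw [if_neg (lt_irrefl _), if_pos (Nat.lt_succ_self i)]
        have hi : i < xs.length := by omega
        simp [hxs', hk, List.getD, List.getElem?_eq_getElem hi]
      · rw [if_neg (by omega), if_neg (by omega)]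
        simp only [hxs', List.getElem?_set]
        rw [if_neg (by omega), if_neg (by omega)]
    rw [hget, herase]
    simp only [Prod.mk.injEq]
    exact ⟨by simp, by push_cast; ring⟩

-- loop 2 only counts: it adds len - 1 - j to the counter
theorem pvLoop2_count (xs : List Int) (j : Nat) (t : Int) :
    (pvLoop2 xs j t).2 = t + ((xs.length - 1 - j : Nat) : Int) := by
  induction xs, j, t using pvLoop2.induct with
  | case1 xs j t h ih =>
    rw [pvLoop2, dif_pos h, ih]
    simp only [List.length_set]
    push_cast [Nat.sub_sub]
    omega
  | case2 xs j t h =>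
    rw [pvLoop2, dif_neg h]
    have : xs.length - 1 - j = 0 := by omega
    simp [this]


-- all-equal corner: min = max forces a one-element line
theorem pv_eqcase (menor : Int) (pre suf : List Int)
    (hpre : menor ∉ pre) (hW : menor ∉ suf)
    (hmin : ∀ x ∈ pre ++ menor :: suf, menor ≤ x)
    (hmax : ∀ x ∈ pre ++ menor :: suf, x ≤ menor) :
    pre = [] ∧ suf = [] := by
  constructor
  · rw [List.eq_nil_iff_forall_not_mem]
    intro a ha
    have h1 := hmin a (by simp [ha])
    have h2 := hmax a (by simp [ha])
    have : a = menor := le_antisymm h2 h1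
    exact hpre (this ▸ ha)
  · rw [List.eq_nil_iff_forall_not_mem]
    intro a ha
    have h1 := hmin a (by simp [ha])
    have h2 := hmax a (by simp [ha])
    have : a = menor := le_antisymm h2 h1
    exact hW (this ▸ ha)

-- where the last shortest sits after the first tallest moved to the front
theorem pv_jk_rel (menor maior : Int) (pre suf U W : List Int)
    (heq : pre ++ maior :: suf = U ++ menor :: W)
    (hpre : maior ∉ pre) (hW : menor ∉ W)
    (hmin : ∀ x ∈ pre ++ maior :: suf, menor ≤ x)
    (hmax : ∀ x ∈ pre ++ maior :: suf, x ≤ maior)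
    (jk : Nat) (hlast : pvLastAt menor (maior :: pre ++ suf) jk) :
    jk = if U.length < pre.length then U.length + 1 else U.length := by
  rcases List.append_eq_append_iff.1 heq with ⟨a', ha1, ha2⟩ | ⟨c', hc1, hc2⟩
  · rcases a' with _ | ⟨x, a''⟩
    · -- U = pre, maior = menor, suf = W: all elements equal
      simp only [List.append_nil] at ha1
      obtain ⟨hmm, hsW⟩ : maior = menor ∧ suf = W := by
        have := ha2; simp at this; exact ⟨this.1, this.2⟩
      subst hmm hsW ha1
      obtain ⟨hp, hs⟩ := pv_eqcase maior U suf hpre hW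
        (by simpa using hmin) (by simpa using hmax)
      subst hp hs
      have h0 : pvLastAt maior [maior] 0 := ⟨[], [], rfl, rfl, by simp⟩
      have := pv_lastAt_unique maior [maior] jk 0 (by simpa using hlast) h0
      simp [this]
    · -- the last shortest lies strictly after the first tallest
      obtain ⟨hx, hsuf⟩ : maior = x ∧ suf = a'' ++ menor :: W := by
        have := ha2; simp at this; exact ⟨this.1, this.2⟩
      subst hx
      have hdec : pvLastAt menor (maior :: pre ++ suf) (maior :: (pre ++ a'')).length :=
        ⟨maior :: (pre ++ a''), W, by simp [hsuf], rfl, hW⟩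
      have hj := pv_lastAt_unique menor _ _ _ hlast hdec
      rw [hj, ha1, if_neg (by simp)]
      simp only [List.length_cons, List.length_append]
      omega
  · rcases c' with _ | ⟨y, c''⟩
    · -- pre = U, menor = maior, W = suf: all elements equal
      simp only [List.append_nil] at hc1
      obtain ⟨hmm, hsW⟩ : menor = maior ∧ W = suf := by
        have := hc2; simp at this; exact ⟨this.1, this.2⟩
      subst hc1
      subst hmm
      subst hsW
      obtain ⟨hp, hs⟩ := pv_eqcase menor pre W hpre hW hmin hmax
      subst hp hs
      have h0 : pvLastAt menor [menor] 0 := ⟨[], [], rfl, rfl, by simp⟩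
      have := pv_lastAt_unique menor [menor] jk 0 (by simpa using hlast) h0
      simp [this]
    · -- the last shortest lies strictly before the first tallest
      obtain ⟨hy, hW'⟩ : menor = y ∧ W = c'' ++ maior :: suf := by
        have := hc2; simp at this; exact ⟨this.1, this.2⟩
      subst hy
      subst hc1
      have hnc : menor ∉ c'' ∧ menor ∉ suf := by
        rw [hW'] at hW; simp at hW; exact ⟨hW.1, hW.2.2⟩
      have hdec : pvLastAt menor (maior :: (U ++ menor :: c'') ++ suf) (U.length + 1) :=
        ⟨maior :: U, c'' ++ suf, by simp, by simp, by
          simp only [List.mem_append, not_or]; exact hnc⟩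
      have := pv_lastAt_unique menor _ _ _ hlast hdec
      rw [this, if_pos (by simp)]

-- ===== VERDICT (by name: the statement is the Claim_ definition above) =====
theorem swipe_spec : Claim_equal_swipe := by
  intro n seq _ hne
  unfold Spec_swipe
  -- names for min and max
  obtain ⟨menor, hm⟩ : ∃ m, PySem.List.min? seq (fun x => x) = some m := by
    rcases h : PySem.List.min? seq (fun x => x) with _ | m
    · exact absurd ((PySem.List.min?_eq_none_iff _ _).1 h) hne
    · exact ⟨m, rfl⟩
  obtain ⟨maior, hM⟩ : ∃ m, PySem.List.max? seq (fun x => x) = some m := by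
    rcases h : PySem.List.max? seq (fun x => x) with _ | m
    · exact absurd ((PySem.List.max?_eq_none_iff _ _).1 h) hne
    · exact ⟨m, rfl⟩
  have hmem_min : menor ∈ seq := PySem.List.min?_mem hm
  have hmem_max : maior ∈ seq := PySem.List.max?_mem hM
  have hmin_le : ∀ x ∈ seq, menor ≤ x := PySem.List.min?_isMin hm
  have hle_max : ∀ x ∈ seq, x ≤ maior := PySem.List.max?_isMax hM
  -- first occurrence of maior, last occurrence of menor in seq
  obtain ⟨fk, hfk⟩ : ∃ k, PySem.List.index? seq maior = some k :=
    Option.isSome_iff_exists.1 ((PySem.List.index?_isSome_iff _ _).2 hmem_max)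
  obtain ⟨pre, suf, hseq, hprelen, hpre⟩ := (PySem.List.index?_eq_some_iff _ _ _).1 hfk
  obtain ⟨lk, hlk⟩ := pv_exists_lastAt menor seq hmem_min
  obtain ⟨U, W, hseq', hUlen, hW⟩ := hlk
  subst hprelen
  subst hUlen
  subst hseq
  -- the last shortest soldier in the updated line
  have hmem_fila : menor ∈ maior :: (pre ++ suf) := by
    have hmm : menor ∈ U ++ menor :: W := by simp
    rw [← hseq'] at hmm
    rcases List.mem_append.1 hmm with h | h
    · simp [h]
    · rcases List.mem_cons.1 h with h | h
      · simp [h]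
      · simp [h]
  obtain ⟨jk, hjla⟩ := pv_exists_lastAt menor _ hmem_fila
  have hjk := pv_jk_rel menor maior pre suf U W hseq' hpre hW hmin_le hle_max jk hjla
  -- A's value
  have hPne : pvPos maior (pre ++ maior :: suf) 0 ≠ [] :=
    pv_pvPos_ne_nil_of_decomp maior pre suf
  have hQne : pvPos menor (pre ++ maior :: suf) 0 ≠ [] := by
    rw [hseq']; exact pv_pvPos_ne_nil_of_decomp menor U W
  have hfm : (pvPos maior (pre ++ maior :: suf) 0).headD 0 = (pre.length : Int) :=
    pv_headD_pvPos maior pre suf hpre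
  have hlm : (pvPos menor (pre ++ maior :: suf) 0).getLastD 0 = (U.length : Int) := by
    rw [hseq']; exact pv_getLastD_pvPos menor U W hW
  have hA : swipe n (pre ++ maior :: suf) =
      if (pre.length : Int) > (U.length : Int)
      then (pre.length : Int) + |(U.length : Int) - ((pre ++ maior :: suf).length : Int) + 1| - 1
      else (pre.length : Int) + |(U.length : Int) - ((pre ++ maior :: suf).length : Int) + 1| := by
    unfold swipe
    simp only [hm, hM, Option.getD_some, pvPos_eq]
    rw [min?_pvPos _ _ _ hPne, max?_pvPos _ _ _ hQne, hfm, hlm]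
  -- B's value
  have hp : pvLoop1 (pre ++ maior :: suf) pre.length 0 = (maior :: (pre ++ suf), (pre.length : Int)) := by
    rw [pvLoop1_correct _ _ _ (by simp), pv_getD_mid, pv_eraseIdx_mid]
    simp
  obtain ⟨F, Bx, hFB, hFlen, hBx⟩ := hjla
  have hridx : PySem.List.index? (maior :: (pre ++ suf)).reverse menor = some Bx.reverse.length :=
    pv_index?_of_firstAt menor _ _ ⟨Bx.reverse, F.reverse, by rw [hFB]; simp, rfl, by simpa using hBx⟩
  have hlenfila : (maior :: (pre ++ suf)).length = F.length + 1 + Bx.length := by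
    rw [hFB]; simp; omega
  have hjeq : (maior :: (pre ++ suf)).length - 1 - Bx.reverse.length = jk := by
    simp only [List.length_reverse]
    omega
  have hB : swipe_alt n (pre ++ maior :: suf) =
      (pre.length : Int) + (((maior :: (pre ++ suf)).length - 1 - jk : Nat) : Int) := by
    unfold swipe_alt
    simp only [hm, hM, hfk, Option.getD_some, hp, PySem.List.slice?_none_none_neg_one,
      hridx, hjeq, pvLoop2_count]
  rw [hA, hB]
  -- arithmetic
  have hlen_eq : pre.length + 1 + suf.length = U.length + 1 + W.length := by
    have := congrArg List.length hseq'
    simp at this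
    omega
  have habs : |(U.length : Int) - ((pre ++ maior :: suf).length : Int) + 1|
      = ((pre ++ maior :: suf).length : Int) - 1 - (U.length : Int) := by
    rw [abs_of_nonpos (by push_cast; simp only [List.length_append, List.length_cons]; push_cast; omega)]
    ring
  rw [habs, hjk]
  simp only [List.length_cons, List.length_append]
  split_ifs <;> omega
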